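-- pv_equiv track=rewrite | github.com/pypi-data/pypi-mirror-158 | packages/akiwi/akiwi-1.3.9.tar.gz/akiwi-1.3.9/akiwi/process_code_template.py | inv_filter_content
-- ===== SOURCE A (Python) =====
-- def inv_filter_content(content, variable_template):
--     found_variable = False
--     for k, v in variable_template:
--         key = "${@" + k + "}"
--         if not found_variable:
--             if content.find(v) == -1:
--                 continue
--
--             found_variable = True
--
--         content = content.replace(v, key)
--     return content, found_variable
-- ===== SOURCE B (Python) =====
-- def inv_filter_content(content, variable_template):
--     pairs = list(variable_template)
--     result = content
--     for k, v in pairs: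
--         result = result.replace(v, "${@" + k + "}")
--     return result, any(v in content for _, v in pairs)
-- ===== Notes on version B (the rewrite author's own statement) =====
-- stated objective: simpler
-- what changed: B drops A's found_variable flag and conditional skipping entirely: it replaces every template value unconditionally (replacements before the first match are provably no-ops since those values do not occur) and computes the flag as a separate any() membership test over the original content.
import Mathlib
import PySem

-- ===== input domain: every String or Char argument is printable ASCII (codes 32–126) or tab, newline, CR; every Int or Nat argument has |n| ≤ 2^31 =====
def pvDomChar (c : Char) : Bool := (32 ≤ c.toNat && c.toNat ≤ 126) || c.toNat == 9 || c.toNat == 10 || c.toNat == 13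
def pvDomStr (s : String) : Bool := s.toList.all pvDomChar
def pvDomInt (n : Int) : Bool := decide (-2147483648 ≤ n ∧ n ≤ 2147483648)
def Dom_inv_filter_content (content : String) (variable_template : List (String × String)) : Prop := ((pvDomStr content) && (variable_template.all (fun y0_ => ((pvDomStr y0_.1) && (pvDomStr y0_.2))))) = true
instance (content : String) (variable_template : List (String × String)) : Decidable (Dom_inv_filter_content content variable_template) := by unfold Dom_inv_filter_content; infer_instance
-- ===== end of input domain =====

-- B removes A's found_variable flag and skip logic: it replaces every template value
-- unconditionally (replacements before the first match are no-ops) and computes the flag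
-- as a separate membership test of each value against the ORIGINAL content; simpler control flow.


-- ===== PORT A =====
-- literal port: one loop carrying (content, found_variable); stepA is the loop body
def stepA (st : String × Bool) (kv : String × String) : String × Bool :=
  let key := "${@" ++ kv.1 ++ "}"
  if !st.2 then
    if PySem.Str.find st.1 kv.2 = -1 then st
    else (PySem.Str.replace st.1 kv.2 key, true)
  else (PySem.Str.replace st.1 kv.2 key, true)

def inv_filter_content (content : String) (variable_template : List (String × String)) : String × Bool :=
  variable_template.foldl stepA (content, false)

-- ===== PORT B =====
-- unconditional replacement fold over ALL pairs, and the flag as any() over the original content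
def inv_filter_content_alt (content : String) (variable_template : List (String × String)) : String × Bool :=
  (variable_template.foldl
    (fun c kv => PySem.Str.replace c kv.2 ("${@" ++ kv.1 ++ "}")) content,
   variable_template.any (fun kv => PySem.Str.isIn kv.2 content))

-- ===== PRECONDITION & SPEC =====
def Spec_inv_filter_content (content : String) (variable_template : List (String × String)) (out : String × Bool) : Prop := out = inv_filter_content_alt content variable_template
instance (content : String) (variable_template : List (String × String)) (out : String × Bool) : Decidable (Spec_inv_filter_content content variable_template out) := by unfold Spec_inv_filter_content; infer_instance

-- ===== CLAIM (what is proved, stated in full; the proofs are below) =====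
def Claim_equal_inv_filter_content : Prop := ∀ (content : String) (variable_template : List (String × String)), Dom_inv_filter_content content variable_template → Spec_inv_filter_content content variable_template (inv_filter_content content variable_template)

-- ===== LEMMAS AND PROOFS =====

-- replace's worker copies the string untouched when old never occurs
theorem replace_go_id (old new : List Char) :
    ∀ (l acc : List Char), (∀ j, ¬ old <+: l.drop j) →
      PySem.Chars.replace.go old new l.length l acc = acc.reverse ++ l := by
  intro l
  induction l with
  | nil => intro acc _; simp [PySem.Chars.replace.go]
  | cons c t ih =>
    intro acc h
    have h0 : ¬ old.isPrefixOf (c :: t) = true := by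
      rw [List.isPrefixOf_iff_prefix]; exact h 0
    rw [show (c :: t).length = t.length + 1 from rfl]
    rw [PySem.Chars.replace.go]
    simp only [h0]
    rw [ih (c :: acc) (fun j => h (j + 1))]
    simp

-- a string is unchanged by replace when the pattern does not occur in it
theorem replace_id_of_not_isIn (s old new : String)
    (h : PySem.Chars.isIn old.toList s.toList = false) :
    PySem.Str.replace s old new = s := by
  have hnp : ∀ j, ¬ old.toList <+: s.toList.drop j := by
    intro j hp
    have : PySem.Chars.isIn old.toList s.toList = true :=
      (PySem.Chars.exists_prefix_drop_iff_isIn _ _).mp ⟨j, hp⟩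
    simp [this] at h
  have hne : ¬ old.toList.isEmpty = true := by
    intro he
    rw [List.isEmpty_iff] at he
    exact hnp 0 (by simp [he])
  apply String.toList_inj.mp
  rw [PySem.Str.toList_replace]
  unfold PySem.Chars.replace
  simp only [hne]
  simpa using replace_go_id old.toList new.toList s.toList [] hnp

-- once found_variable is true, A's loop is a plain replacement fold
theorem foldl_found (vt : List (String × String)) (c : String) :
    vt.foldl stepA (c, true)
    = (vt.foldl (fun c kv => PySem.Str.replace c kv.2 ("${@" ++ kv.1 ++ "}")) c, true) := by
  induction vt generalizing c with
  | nil => rfl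
  | cons hd tl ih =>
    rw [List.foldl_cons, List.foldl_cons]
    have : stepA (c, true) hd = (PySem.Str.replace c hd.2 ("${@" ++ hd.1 ++ "}"), true) := by
      simp [stepA]
    rw [this, ih]

theorem equiv_aux (vt : List (String × String)) (c : String) :
    vt.foldl stepA (c, false) = inv_filter_content_alt c vt := by
  induction vt generalizing c with
  | nil => rfl
  | cons hd tl ih =>
    by_cases h : PySem.Chars.isIn hd.2.toList c.toList = true
    · have hf : ¬ PySem.Chars.find c.toList hd.2.toList = -1 := by
        rw [PySem.Chars.find_eq_neg_one_iff]
        exact not_not_intro ((PySem.Chars.isIn_iff_infix _ _).mp h)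
      have h1 : stepA (c, false) hd = (PySem.Str.replace c hd.2 ("${@" ++ hd.1 ++ "}"), true) := by
        simp [stepA, hf]
      rw [List.foldl_cons, h1, foldl_found]
      simp [inv_filter_content_alt, h]
    · have hb : PySem.Chars.isIn hd.2.toList c.toList = false := eq_false_of_ne_true h
      have hid : PySem.Str.replace c hd.2 ("${@" ++ hd.1 ++ "}") = c :=
        replace_id_of_not_isIn c hd.2 _ hb
      have hf : PySem.Chars.find c.toList hd.2.toList = -1 := by
        rw [PySem.Chars.find_eq_neg_one_iff]
        exact (PySem.Chars.isIn_eq_false_iff _ _).mp hb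
      have h1 : stepA (c, false) hd = (c, false) := by simp [stepA, hf]
      rw [List.foldl_cons, h1, ih c]
      simp [inv_filter_content_alt, hb, hid]

-- ===== VERDICT (by name: the statement is the Claim_ definition above) =====
theorem inv_filter_content_spec : Claim_equal_inv_filter_content := by
  intro content vt _
  show inv_filter_content content vt = inv_filter_content_alt content vt
  exact equiv_aux vt content
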